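-- pv_equiv track=rewrite | github.com/panchocosil/pathfusion | pathfusion/analyzers/paths.py | extract_parent_paths
-- ===== SOURCE A (Python) =====
-- def extract_parent_paths(path: str) -> set[str]:
--     normalized = path if path.startswith("/") else f"/{path}"
--     segments = [segment for segment in normalized.split("/") if segment]
--     if not segments:
--         return {"/"}
--     parents = {"/"}
--     current = ""
--     for segment in segments[:-1]:
--         current += f"/{segment}"
--         parents.add(f"{current}/")
--     if normalized.endswith("/"):
--         parents.add(normalized)
--     return parents
-- ===== SOURCE B (Python) =====
-- def extract_parent_paths(path: str) -> set[str]: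
--     normalized = path if path.startswith("/") else f"/{path}"
--     # Canonical form: collapse every run of slashes to one slash.
--     canon = ""
--     for ch in normalized:
--         if ch != "/" or not canon.endswith("/"):
--             canon += ch
--     parents = {"/"}
--     if canon == "/":
--         return parents
--     # Every interior slash of canon closes a parent prefix.
--     for j in range(1, len(canon) - 1):
--         if canon[j] == "/":
--             parents.add(canon[: j + 1])
--     if normalized.endswith("/"):
--         parents.add(normalized)
--     return parents
-- ===== Notes on version B (the rewrite author's own statement) =====
-- stated objective: alternative
-- what changed: B abandons A's split-into-segments-and-rejoin pipeline: it collapses runs of slashes into a canonical string in one character scan and then reads each parent directly off as the prefix ending at each interior slash of that canonical string.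
import Mathlib
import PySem

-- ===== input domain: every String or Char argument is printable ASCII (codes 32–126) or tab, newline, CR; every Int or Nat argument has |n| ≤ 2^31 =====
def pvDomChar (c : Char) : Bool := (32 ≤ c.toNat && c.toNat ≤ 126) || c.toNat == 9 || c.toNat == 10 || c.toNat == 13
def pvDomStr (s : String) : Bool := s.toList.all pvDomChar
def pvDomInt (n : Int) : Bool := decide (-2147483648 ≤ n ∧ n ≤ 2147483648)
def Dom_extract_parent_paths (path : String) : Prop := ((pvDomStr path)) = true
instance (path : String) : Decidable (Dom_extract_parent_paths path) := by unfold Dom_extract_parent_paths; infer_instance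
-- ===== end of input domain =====

-- B replaces A's split-into-segments pipeline by a single character scan: it
-- collapses slash runs into a canonical string and reads each parent off as the
-- prefix ending at each interior slash; same asymptotic cost, different algorithm.

-- ===== PORT A =====
def extract_parent_paths (path : String) : List String :=
  let p := path.toList
  let normalized := if PySem.Chars.startswith p ['/'] then p else '/' :: p
  let segments := (PySem.Chars.splitOn normalized ['/']).filter (fun s => !s.isEmpty)
  if segments = [] then ["/"]
  else
    let st := (PySem.List.slice segments none (some (-1))).foldl
      (fun (acc : List Char × PySem.Set (List Char)) seg =>
        let cur := acc.1 ++ '/' :: seg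
        (cur, PySem.Set.add acc.2 (cur ++ ['/'])))
      (([] : List Char), PySem.Set.ofList [['/']])
    let parents := if PySem.Chars.endswith normalized ['/'] then PySem.Set.add st.2 normalized else st.2
    parents.map String.ofList

-- ===== PORT B =====
def extract_parent_paths_alt (path : String) : List String :=
  let p := path.toList
  let normalized := if PySem.Chars.startswith p ['/'] then p else '/' :: p
  -- canonical form: collapse every run of slashes to one slash
  let canon := normalized.foldl
    (fun (c : List Char) ch =>
      if ch ≠ '/' ∨ PySem.Chars.endswith c ['/'] = false then c ++ [ch] else c) []
  let parents := PySem.Set.ofList [['/']]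
  if canon = ['/'] then parents.map String.ofList
  else
    -- every interior slash of canon closes a parent prefix
    let parents := (PySem.List.pyRange 1 ((canon.length : Int) - 1) 1).foldl
      (fun s j =>
        if PySem.List.pyGetD canon j ' ' = '/' then
          PySem.Set.add s (PySem.List.slice canon none (some (j + 1)))
        else s)
      parents
    let parents := if PySem.Chars.endswith normalized ['/'] then PySem.Set.add parents normalized else parents
    parents.map String.ofList

-- ===== PRECONDITION & SPEC =====
def Spec_extract_parent_paths (path : String) (out : List String) : Prop := out = extract_parent_paths_alt path
instance (path : String) (out : List String) : Decidable (Spec_extract_parent_paths path out) := by unfold Spec_extract_parent_paths; infer_instance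

-- ===== CLAIM (what is proved, stated in full; the proofs are below) =====
def Claim_equal_extract_parent_paths : Prop := ∀ (path : String), Dom_extract_parent_paths path → Spec_extract_parent_paths path (extract_parent_paths path)

-- ===== LEMMAS AND PROOFS =====

-- fuel-free form of PySem.Chars.splitOn on the single-character separator '/'
def pvSplit : List Char → List (List Char)
  | [] => [[]]
  | c :: t => if c = '/' then [] :: pvSplit t else (pvSplit t).modifyHead (c :: ·)

theorem pvModifyHead_id (l : List (List Char)) : List.modifyHead (fun x => x) l = l := by
  cases l <;> simp

theorem pvGo_spec (t : List Char) : ∀ (fuel : Nat) (cur : List Char) (acc : List (List Char)),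
    t.length ≤ fuel →
    PySem.Chars.splitOn.go ['/'] fuel t cur acc
      = acc.reverse ++ (pvSplit t).modifyHead (cur.reverse ++ ·) := by
  induction t with
  | nil => intro fuel cur acc h; cases fuel <;> simp [PySem.Chars.splitOn.go, pvSplit]
  | cons c rest ih =>
      intro fuel cur acc h
      cases fuel with
      | succ f =>
        rw [PySem.Chars.splitOn.go]
        by_cases hc : c = '/'
        · subst hc
          have hp : List.isPrefixOf ['/'] ('/' :: rest) = true := by simp [List.isPrefixOf]
          simp only [hp, if_pos, List.length_cons, List.drop_succ_cons, List.length_nil,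
            List.drop_zero]
          rw [ih f [] (cur.reverse :: acc) (by simpa using h)]
          simp [pvSplit, pvModifyHead_id]
        · have hp : List.isPrefixOf ['/'] (c :: rest) = false := by
            simp [List.isPrefixOf, Ne.symm hc]
          simp only [hp, Bool.false_eq_true, if_neg, not_false_iff]
          rw [ih f (c :: cur) acc (by simpa using h)]
          rw [pvSplit, if_neg hc, List.modifyHead_modifyHead]
          simp [Function.comp_def]
      | zero => simp at h

theorem pvSplitOn_eq (l : List Char) : PySem.Chars.splitOn l ['/'] = pvSplit l := by
  rw [PySem.Chars.splitOn, pvGo_spec l (l.length+1) [] [] (by omega)]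
  simp [pvModifyHead_id]

-- nonempty pieces of the split
def pvSegs (l : List Char) : List (List Char) := (pvSplit l).filter (fun s => !s.isEmpty)

-- each segment with a leading slash, concatenated
def pvPref (L : List (List Char)) : List Char := L.flatMap (fun seg => '/' :: seg)

-- the segments joined by single slashes (no leading slash)
def pvT : List (List Char) → List Char
  | [] => []
  | s :: rest => s ++ pvPref rest

theorem pvPref_eq (L : List (List Char)) (h : L ≠ []) : pvPref L = '/' :: pvT L := by
  cases L with
  | nil => exact absurd rfl h
  | cons s rest => simp [pvPref, pvT]

-- the trailing-slash marker, as a function of the last character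
def pvEtr (l : List Char) : List Char := if l.getLast? = some '/' then ['/'] else []

theorem pvEtr_cons_cons (a b : Char) (l : List Char) : pvEtr (a :: b :: l) = pvEtr (b :: l) := by
  simp [pvEtr]

theorem pvEnds_eq (l : List Char) : PySem.Chars.endswith l ['/'] = decide (l.getLast? = some '/') := by
  by_cases h : l.getLast? = some '/'
  · obtain ⟨t, rfl⟩ := List.getLast?_eq_some_iff.1 h
    rw [(PySem.Chars.endswith_iff _ _).2 ⟨t, rfl⟩]
    simp [h]
  · rw [decide_eq_false h, Bool.eq_false_iff]
    intro hw
    obtain ⟨s, hs⟩ := (PySem.Chars.endswith_iff _ _).1 hw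
    rw [← hs] at h; exact h List.getLast?_concat

-- structural form of B's collapse scan: b = "the output so far ends with '/'"
def pvCrec : Bool → List Char → List Char
  | _, [] => []
  | b, c :: t => if c = '/' then (if b then pvCrec true t else '/' :: pvCrec true t)
                 else c :: pvCrec false t

theorem pvCollapse_foldl (l : List Char) : ∀ (acc : List Char),
    l.foldl (fun (c : List Char) ch =>
      if ch ≠ '/' ∨ PySem.Chars.endswith c ['/'] = false then c ++ [ch] else c) acc
    = acc ++ pvCrec (decide (acc.getLast? = some '/')) l := by
  induction l with
  | nil => intro acc; simp [pvCrec]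
  | cons c t ih =>
      intro acc
      simp only [List.foldl_cons]
      by_cases hc : c = '/'
      · subst hc
        by_cases hb : acc.getLast? = some '/'
        · rw [if_neg (by simp [pvEnds_eq, hb]), ih acc]
          simp [pvCrec, hb]
        · rw [if_pos (Or.inr (by simp [pvEnds_eq, hb])), ih (acc ++ ['/'])]
          simp [pvCrec, hb]
      · rw [if_pos (Or.inl hc), ih (acc ++ [c])]
        simp [pvCrec, hc]

-- remainder of the collapse after the first segment, in the "no slash yet" state
def pvRest : List Char → List Char
  | [] => []
  | c :: t => if c = '/' then '/' :: pvCrec true t else pvRest t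

theorem pvSplit_ne_nil (t : List Char) : pvSplit t ≠ [] := by
  induction t with
  | nil => simp [pvSplit]
  | cons c t ih =>
      by_cases hc : c = '/'
      · simp [pvSplit, hc]
      · simp only [pvSplit, if_neg hc]
        intro hw
        have := congrArg List.length hw
        simp at this
        exact ih this

theorem pvCrec_false_spec (t : List Char) :
    pvCrec false t = (pvSplit t).headI ++ pvRest t := by
  induction t with
  | nil => simp [pvCrec, pvSplit, pvRest]
  | cons c t ih =>
      by_cases hc : c = '/'
      · subst hc; simp [pvCrec, pvSplit, pvRest]
      · have hne : pvSplit t ≠ [] := pvSplit_ne_nil t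
        obtain ⟨h, r, hr⟩ := List.exists_cons_of_ne_nil hne
        simp [pvCrec, pvSplit, pvRest, hc, ih, hr]

theorem pvSplit_no_slash (t : List Char) : ∀ s ∈ pvSplit t, '/' ∉ s := by
  induction t with
  | nil => simp [pvSplit]
  | cons c t ih =>
      by_cases hc : c = '/'
      · subst hc
        simp only [pvSplit]
        intro s hs
        rcases List.mem_cons.1 hs with rfl | hs'
        · simp
        · exact ih s hs' 
      · obtain ⟨h, r, hr⟩ := List.exists_cons_of_ne_nil (pvSplit_ne_nil t)
        simp only [pvSplit, if_neg hc, hr, List.modifyHead_cons]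
        intro s hs
        rcases List.mem_cons.1 hs with rfl | hs'
        · simp only [List.mem_cons, not_or]
          exact ⟨Ne.symm hc, ih h (by simp [hr])⟩
        · exact ih s (by simp [hr, hs'])

-- the key characterisation of the collapse: pvCrec after a slash writes the
-- slash-joined nonempty segments, plus one trailing slash iff the input ends in one
theorem pvPR (n : Nat) : ∀ t : List Char, t.length ≤ n →
    ('/' :: pvCrec true t = pvPref (pvSegs t) ++ pvEtr ('/' :: t))
    ∧ (pvRest t = pvPref (((pvSplit t).tail).filter (fun s => !s.isEmpty))
        ++ (if t = [] then [] else pvEtr t)) := by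
  induction n with
  | zero =>
      intro t ht
      rw [List.length_eq_zero_iff.1 (Nat.le_zero.1 ht)]
      simp [pvCrec, pvSegs, pvSplit, pvPref, pvEtr, pvRest]
  | succ n ih =>
      intro t ht
      cases t with
      | nil => simp [pvCrec, pvSegs, pvSplit, pvPref, pvEtr, pvRest]
      | cons c t' =>
        have ht' : t'.length ≤ n := by simpa using ht
        have hP := (ih t' ht').1
        by_cases hc : c = '/'
        · subst hc
          constructor
          · have hCrec : pvCrec true ('/' :: t') = pvCrec true t' := by simp [pvCrec]
            have hSegs : pvSegs ('/' :: t') = pvSegs t' := by simp [pvSegs, pvSplit]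
            rw [hCrec, hSegs, pvEtr_cons_cons, hP]
          · rw [show pvRest ('/' :: t') = '/' :: pvCrec true t' from by simp [pvRest]]
            rw [show (pvSplit ('/' :: t')).tail = pvSplit t' from by simp [pvSplit]]
            rw [if_neg (List.cons_ne_nil _ _)]
            simp only [pvSegs] at hP
            exact hP
        · obtain ⟨h, r, hr⟩ := List.exists_cons_of_ne_nil (pvSplit_ne_nil t')
          have hRest : pvRest t' = pvPref (r.filter (fun s => !s.isEmpty))
              ++ (if t' = [] then [] else pvEtr t') := by
            have := (ih t' ht').2
            rwa [hr, List.tail_cons] at this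
          constructor
          · have hsegs : pvSegs (c :: t') = (c :: h) :: r.filter (fun s => !s.isEmpty) := by
              simp [pvSegs, pvSplit, hc, hr]
            have hcrec : pvCrec true (c :: t') = c :: pvCrec false t' := by simp [pvCrec, hc]
            rw [hcrec, pvCrec_false_spec, hr, List.headI_cons, hsegs,
              pvPref_eq _ (List.cons_ne_nil _ _)]
            simp only [pvT]
            rw [hRest]
            cases t' with
            | nil =>
                simp only [pvSplit] at hr
                have hh : h = [] := by simpa using congrArg List.headI hr
                subst hh
                simp [pvEtr, hc]
            | cons b u =>
                rw [if_neg (List.cons_ne_nil _ _), pvEtr_cons_cons, pvEtr_cons_cons]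
                simp [List.append_assoc]
          · have hpr : pvRest (c :: t') = pvRest t' := by simp [pvRest, hc]
            have htail : (pvSplit (c :: t')).tail = r := by simp [pvSplit, hc, hr]
            rw [hpr, hRest, htail]
            cases t' with
            | nil => simp [pvEtr, hc]
            | cons b u =>
                rw [if_neg (List.cons_ne_nil _ _), if_neg (List.cons_ne_nil _ _), pvEtr_cons_cons]

-- B's guarded index loop over the canon, as a structural scan
def pvAddsOf : List Char → List Char → List (List Char)
  | _, [] => []
  | pre, c :: rest =>
      (if c = '/' then [pre ++ [c]] else []) ++ pvAddsOf (pre ++ [c]) rest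

theorem pvAddsOf_append (xs ys pre : List Char) :
    pvAddsOf pre (xs ++ ys) = pvAddsOf pre xs ++ pvAddsOf (pre ++ xs) ys := by
  induction xs generalizing pre with
  | nil => simp [pvAddsOf]
  | cons c t ih => simp [pvAddsOf, ih, List.append_assoc]

theorem pvAddsOf_no_slash (xs pre : List Char) (h : '/' ∉ xs) : pvAddsOf pre xs = [] := by
  induction xs generalizing pre with
  | nil => rfl
  | cons c t ih =>
      simp only [List.mem_cons, not_or] at h
      simp [pvAddsOf, ih _ h.2, Ne.symm h.1]

-- B's fold over the index range equals the structural scan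
theorem pvLoopB (post : List Char) (d : Char) : ∀ (xs pre : List Char) (init : PySem.Set (List Char)),
    (PySem.List.pyRange (pre.length : Int) ((pre.length : Int) + (xs.length : Int)) 1).foldl
      (fun s j =>
        if PySem.List.pyGetD (pre ++ (xs ++ post)) j d = '/' then
          PySem.Set.add s (PySem.List.slice (pre ++ (xs ++ post)) none (some (j + 1)))
        else s) init
    = (pvAddsOf pre xs).foldl PySem.Set.add init := by
  intro xs
  induction xs with
  | nil =>
      intro pre init
      rw [PySem.List.pyRange_one_eq_nil (by simp)]
      rfl
  | cons c t ih =>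
      intro pre init
      rw [PySem.List.pyRange_one_cons (by push_cast [List.length_cons]; omega)]
      simp only [List.foldl_cons]
      have hget : PySem.List.pyGetD (pre ++ (c :: t ++ post)) (pre.length : Int) d = c := by
        rw [PySem.List.pyGetD_natCast]
        unfold List.getD
        rw [List.getElem?_append_right (le_refl pre.length)]
        simp
      have hslice : PySem.List.slice (pre ++ (c :: t ++ post)) none (some ((pre.length : Int) + 1))
          = pre ++ [c] := by
        have h0 : (0 : Int) ≤ (pre.length : Int) + 1 := by omega
        rw [PySem.List.slice_to _ h0]
        have : ((pre.length : Int) + 1).toNat = pre.length + 1 := by omega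
        rw [this, List.take_append]
        simp
      have harr : pre ++ (c :: t ++ post) = (pre ++ [c]) ++ (t ++ post) := by simp
      have hbnd : (pre.length : Int) + ((c :: t).length : Int)
          = (((pre ++ [c]).length : Nat) : Int) + ((t.length : Nat) : Int) := by
        simp; omega
      have hini : (pre.length : Int) + 1 = (((pre ++ [c]).length : Nat) : Int) := by
        simp
      rw [hget, hslice, hbnd, hini, harr]
      rw [ih (pre ++ [c])]
      by_cases hcs : c = '/'
      · simp [pvAddsOf, hcs]
      · simp [pvAddsOf, hcs]

-- the structural scan over the canon produces exactly the slash-joined prefixes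
theorem pvM (S : List (List Char)) : ∀ pre, (∀ s ∈ S, s ≠ [] ∧ '/' ∉ s) →
    pvAddsOf pre (pvT S)
      = (List.range (S.length - 1)).map (fun k => pre ++ pvT (S.take (k + 1)) ++ ['/']) := by
  induction S with
  | nil => intro pre _; simp [pvT, pvAddsOf]
  | cons s rest ih =>
      intro pre hS
      cases rest with
      | nil =>
          simp only [pvT, pvPref, List.flatMap_nil, List.append_nil]
          rw [pvAddsOf_no_slash _ _ (hS s (by simp)).2]
          simp
      | cons r0 rs =>
          have hrest : ∀ x ∈ r0 :: rs, x ≠ [] ∧ '/' ∉ x := fun x hx => hS x (by simp [hx])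
          have hT : pvT (s :: r0 :: rs) = s ++ ('/' :: pvT (r0 :: rs)) := by
            rw [pvT, pvPref_eq _ (List.cons_ne_nil _ _)]
          rw [hT, pvAddsOf_append, pvAddsOf_no_slash _ _ (hS s (by simp)).2]
          rw [show pvAddsOf (pre ++ s) ('/' :: pvT (r0 :: rs))
              = ((pre ++ s) ++ ['/']) :: pvAddsOf ((pre ++ s) ++ ['/']) (pvT (r0 :: rs)) from by
            simp [pvAddsOf]]
          rw [ih ((pre ++ s) ++ ['/']) hrest]
          simp only [List.length_cons, Nat.add_sub_cancel, List.range_succ_eq_map,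
            List.map_cons, List.map_map, List.nil_append]
          refine List.cons_eq_cons.mpr ⟨by simp [pvT, pvPref], ?_⟩
          apply List.map_congr_left
          intro k _
          have htake : ((s :: r0 :: rs).take (k + 1 + 1)) = s :: ((r0 :: rs).take (k + 1)) := by
            simp [List.take_succ_cons]
          have hne : (r0 :: rs).take (k + 1) ≠ [] := by simp
          simp only [Function.comp_apply, htake, pvT, pvPref_eq _ hne]
          simp [List.append_assoc]

-- A's loop : additions in order, starting from running prefix c
def pvAddsA (L : List (List Char)) (c : List Char) : List (List Char) :=
  match L with
  | [] => []
  | seg :: rest => ((c ++ '/' :: seg) ++ ['/']) :: pvAddsA rest (c ++ '/' :: seg)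

theorem pvFoldA_snd (L : List (List Char)) (c : List Char) (s : PySem.Set (List Char)) :
    (L.foldl
      (fun (acc : List Char × PySem.Set (List Char)) seg =>
        (acc.1 ++ '/' :: seg, PySem.Set.add acc.2 ((acc.1 ++ '/' :: seg) ++ ['/'])))
      (c, s)).2 = (pvAddsA L c).foldl PySem.Set.add s := by
  induction L generalizing c s with
  | nil => rfl
  | cons seg rest ih =>
      simp only [List.foldl_cons, pvAddsA]
      exact ih (c ++ '/' :: seg) (PySem.Set.add s ((c ++ '/' :: seg) ++ ['/']))

theorem pvAddsA_eq (L : List (List Char)) (c : List Char) :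
    pvAddsA L c = (List.range L.length).map (fun k => c ++ pvPref (L.take (k + 1)) ++ ['/']) := by
  induction L generalizing c with
  | nil => rfl
  | cons seg rest ih =>
      simp only [pvAddsA, List.length_cons, List.range_succ_eq_map, List.map_cons, List.map_map]
      refine List.cons_eq_cons.mpr ⟨by simp [pvPref], ?_⟩
      rw [ih]
      apply List.map_congr_left
      intro k _
      simp [pvPref, Function.comp]

theorem pvT_concat (init : List (List Char)) (sm : List Char) (h : init ≠ []) :
    pvT (init ++ [sm]) = pvT init ++ '/' :: sm := by
  cases init with
  | nil => exact absurd rfl h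
  | cons a u => simp [pvT, pvPref]

theorem pvSegs_prop (m : List Char) : ∀ s ∈ pvSegs m, s ≠ [] ∧ '/' ∉ s := by
  intro s hs
  rw [pvSegs, List.mem_filter] at hs
  exact ⟨by simpa using hs.2, pvSplit_no_slash m s hs.1⟩

theorem pvM2 (S : List (List Char)) (h : ∀ s ∈ S, s ≠ [] ∧ '/' ∉ s) :
    pvAddsOf ['/'] ((pvT S).dropLast)
      = (List.range (S.length - 1)).map (fun k => ['/'] ++ pvT (S.take (k + 1)) ++ ['/']) := by
  rcases List.eq_nil_or_concat S with rfl | ⟨init, sm, rfl⟩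
  · simp [pvT, pvAddsOf]
  · simp only [List.concat_eq_append] at h ⊢
    have hsm : sm ≠ [] ∧ '/' ∉ sm := h sm (by simp)
    cases init with
    | nil =>
        simp only [List.nil_append]
        have hdl : '/' ∉ (pvT [sm]).dropLast := by
          intro hw
          exact hsm.2 (List.mem_of_mem_dropLast (by simpa [pvT, pvPref] using hw))
        rw [pvAddsOf_no_slash _ _ hdl]
        simp
    | cons a u =>
        have hinit : ∀ s ∈ a :: u, s ≠ [] ∧ '/' ∉ s := fun s hs =>
          h s (List.mem_append_left [sm] hs)
        rw [show a :: u ++ [sm] = (a :: u) ++ [sm] from rfl, pvT_concat _ _ (List.cons_ne_nil a u)]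
        have hdrop : (pvT (a :: u) ++ '/' :: sm).dropLast = pvT (a :: u) ++ '/' :: sm.dropLast := by
          rw [List.dropLast_append_of_ne_nil (List.cons_ne_nil _ _)]
          cases sm with
          | nil => exact absurd rfl hsm.1
          | cons b v => simp
        rw [hdrop, pvAddsOf_append]
        rw [show pvAddsOf (['/'] ++ pvT (a :: u)) ('/' :: sm.dropLast)
            = ((['/'] ++ pvT (a :: u)) ++ ['/'])
                :: pvAddsOf ((['/'] ++ pvT (a :: u)) ++ ['/']) sm.dropLast from by
          simp [pvAddsOf]]
        have hdl2 : '/' ∉ sm.dropLast := fun hw => hsm.2 (List.mem_of_mem_dropLast hw)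
        rw [pvAddsOf_no_slash _ _ hdl2, pvM (a :: u) ['/'] hinit]
        have hlen1 : (a :: u).length - 1 = u.length := by simp
        have hlen : ((a :: u) ++ [sm]).length - 1 = u.length + 1 := by simp
        rw [hlen1, hlen, List.range_succ, List.map_append]
        congr 1
        · apply List.map_congr_left
          intro k hk
          rw [List.mem_range] at hk
          rw [List.take_append_of_le_length (by simp; omega)]
        · have h1 : ((a :: u) ++ [sm]).take (u.length + 1) = a :: u := by
            rw [List.take_append_of_le_length (by simp)]
            exact List.take_of_length_le (by simp)
          rw [List.map_cons, List.map_nil, h1]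

-- the two programs agree on any normalized input '/'::m
theorem pvCore (m : List Char) :
    (if ((PySem.Chars.splitOn ('/' :: m) ['/']).filter (fun s => !s.isEmpty)) = [] then ["/"]
     else
       let st := (PySem.List.slice ((PySem.Chars.splitOn ('/' :: m) ['/']).filter (fun s => !s.isEmpty)) none (some (-1))).foldl
         (fun (acc : List Char × PySem.Set (List Char)) seg =>
           (acc.1 ++ '/' :: seg, PySem.Set.add acc.2 ((acc.1 ++ '/' :: seg) ++ ['/'])))
         (([] : List Char), PySem.Set.ofList [['/']])
       let parents := if PySem.Chars.endswith ('/' :: m) ['/'] then PySem.Set.add st.2 ('/' :: m) else st.2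
       parents.map String.ofList)
    = (let canon := ('/' :: m).foldl
        (fun (c : List Char) ch =>
          if ch ≠ '/' ∨ PySem.Chars.endswith c ['/'] = false then c ++ [ch] else c) []
       if canon = ['/'] then (PySem.Set.ofList [['/']]).map String.ofList
       else
         let parents := (PySem.List.pyRange 1 ((canon.length : Int) - 1) 1).foldl
           (fun s j =>
             if PySem.List.pyGetD canon j ' ' = '/' then
               PySem.Set.add s (PySem.List.slice canon none (some (j + 1)))
             else s)
           (PySem.Set.ofList [['/']])
         let parents := if PySem.Chars.endswith ('/' :: m) ['/'] then PySem.Set.add parents ('/' :: m) else parents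
         parents.map String.ofList) := by
  have h2 : (PySem.Chars.splitOn ('/' :: m) ['/']).filter (fun s => !s.isEmpty) = pvSegs m := by
    rw [pvSplitOn_eq]
    simp [pvSplit, pvSegs]
  have hcanon : ('/' :: m).foldl
      (fun (c : List Char) ch =>
        if ch ≠ '/' ∨ PySem.Chars.endswith c ['/'] = false then c ++ [ch] else c) []
      = pvPref (pvSegs m) ++ pvEtr ('/' :: m) := by
    rw [pvCollapse_foldl ('/' :: m) []]
    have : pvCrec (decide (([] : List Char).getLast? = some '/')) ('/' :: m)
        = '/' :: pvCrec true m := by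
      simp [pvCrec]
    rw [this]
    exact (pvPR m.length m le_rfl).1
  simp only [h2, hcanon]
  by_cases hS : pvSegs m = []
  · have hEtr : pvEtr ('/' :: m) = ['/'] := by
      rw [hS] at hcanon
      simp only [pvPref, List.flatMap_nil, List.nil_append] at hcanon
      unfold pvEtr at hcanon ⊢
      split at hcanon
      · simp [*]
      · rw [pvCollapse_foldl ('/' :: m) []] at hcanon
        simp [pvCrec] at hcanon
    rw [if_pos hS, hS, if_pos (by simp [pvPref, hEtr])]
    rfl
  · obtain ⟨s0, S', hS0⟩ := List.exists_cons_of_ne_nil hS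
    have hprop := pvSegs_prop m
    have hs0 : s0 ≠ [] := (hprop s0 (by rw [hS0]; simp)).1
    have hTne : pvT (pvSegs m) ≠ [] := by
      rw [hS0]
      simp only [pvT]
      intro hw
      exact hs0 (List.append_eq_nil_iff.1 hw).1
    have hbne : pvT (pvSegs m) ++ pvEtr ('/' :: m) ≠ [] := fun hw =>
      hTne (List.append_eq_nil_iff.1 hw).1
    have hPS : pvPref (pvSegs m) ++ pvEtr ('/' :: m)
        = '/' :: (pvT (pvSegs m) ++ pvEtr ('/' :: m)) := by
      rw [pvPref_eq _ hS]
      rfl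
    have hcne : pvPref (pvSegs m) ++ pvEtr ('/' :: m) ≠ ['/'] := by
      rw [hPS]
      intro hw
      exact hbne (by simpa using hw)
    rw [if_neg hS, if_neg hcne]
    -- common form of the added parents
    have hCF := pvM2 (pvSegs m) hprop
    -- A's additions
    have hA : ((PySem.List.slice (pvSegs m) none (some (-1))).foldl
        (fun (acc : List Char × PySem.Set (List Char)) seg =>
          (acc.1 ++ '/' :: seg, PySem.Set.add acc.2 ((acc.1 ++ '/' :: seg) ++ ['/'])))
        (([] : List Char), PySem.Set.ofList [['/']])).2
        = ((List.range ((pvSegs m).length - 1)).map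
            (fun k => ['/'] ++ pvT ((pvSegs m).take (k + 1)) ++ ['/'])).foldl
            PySem.Set.add (PySem.Set.ofList [['/']]) := by
      rw [PySem.List.slice_to_neg_one, pvFoldA_snd, pvAddsA_eq]
      congr 1
      rw [List.length_dropLast]
      apply List.map_congr_left
      intro k hk
      rw [List.mem_range] at hk
      have htk : (pvSegs m).dropLast.take (k + 1) = (pvSegs m).take (k + 1) := by
        rw [List.dropLast_eq_take, List.take_take]
        congr 1
        omega
      have htne : (pvSegs m).take (k + 1) ≠ [] := by
        rw [hS0]
        simp
      rw [htk, pvPref_eq _ htne]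
      simp
    -- B's additions
    have hB : (PySem.List.pyRange 1 (((pvPref (pvSegs m) ++ pvEtr ('/' :: m)).length : Int) - 1) 1).foldl
        (fun s j =>
          if PySem.List.pyGetD (pvPref (pvSegs m) ++ pvEtr ('/' :: m)) j ' ' = '/' then
            PySem.Set.add s (PySem.List.slice (pvPref (pvSegs m) ++ pvEtr ('/' :: m)) none (some (j + 1)))
          else s)
        (PySem.Set.ofList [['/']])
        = ((List.range ((pvSegs m).length - 1)).map
            (fun k => ['/'] ++ pvT ((pvSegs m).take (k + 1)) ++ ['/'])).foldl
            PySem.Set.add (PySem.Set.ofList [['/']]) := by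
      set body := pvT (pvSegs m) ++ pvEtr ('/' :: m) with hbodydef
      have hsplitb : body = body.dropLast ++ [body.getLast hbne] :=
        (List.dropLast_append_getLast hbne).symm
      have hlb : 1 ≤ body.length := by
        cases hb : body with
        | nil => exact absurd hb hbne
        | cons x xs => simp
      have hcan2 : pvPref (pvSegs m) ++ pvEtr ('/' :: m)
          = ['/'] ++ (body.dropLast ++ [body.getLast hbne]) := by
        rw [hPS, ← hsplitb]
        rfl
      have hrange : (((pvPref (pvSegs m) ++ pvEtr ('/' :: m)).length : Int) - 1)
          = (1 : Int) + ((body.dropLast.length : Nat) : Int) := by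
        rw [hPS]
        simp only [List.length_cons, List.length_dropLast]
        push_cast
        omega
      rw [hrange, hcan2]
      have hloop := pvLoopB [body.getLast hbne] ' ' body.dropLast ['/'] (PySem.Set.ofList [['/']])
      simp only [show (['/'] : List Char).length = 1 from rfl, Nat.cast_one] at hloop
      rw [hloop]
      congr 1
      by_cases hE : ('/' :: m).getLast? = some '/'
      · have : body = pvT (pvSegs m) ++ ['/'] := by rw [hbodydef]; simp [pvEtr, hE]
        rw [this, List.dropLast_concat]
        exact pvM (pvSegs m) ['/'] hprop
      · have : body = pvT (pvSegs m) := by rw [hbodydef]; simp [pvEtr, hE]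
        rw [this]
        exact hCF
    simp only [hA, hB]

theorem extract_parent_paths_spec_aux (path : String) :
    extract_parent_paths path = extract_parent_paths_alt path := by
  have hnorm : ∃ m, (if PySem.Chars.startswith path.toList ['/'] then path.toList
      else '/' :: path.toList) = '/' :: m := by
    by_cases hs : PySem.Chars.startswith path.toList ['/'] = true
    · obtain ⟨t, ht⟩ := (PySem.Chars.startswith_iff _ _).1 hs
      exact ⟨t, by rw [if_pos hs, ← ht]; rfl⟩
    · exact ⟨path.toList, by rw [if_neg hs]⟩
  obtain ⟨m, hm⟩ := hnorm
  simp only [extract_parent_paths, extract_parent_paths_alt, hm]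
  exact pvCore m

-- ===== VERDICT (by name: the statement is the Claim_ definition above) =====
theorem extract_parent_paths_spec : Claim_equal_extract_parent_paths := by
  intro path _
  exact extract_parent_paths_spec_aux path
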